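-- pv_equiv track=rewrite | github.com/Mikuseta/Pythonohjelmointi | functions.py | magazine_serial_check
-- ===== SOURCE A (Python) =====
-- def magazine_serial_check(serial):
--     serial = serial.replace("-", "")
--     if len(serial) != 8 or not serial.isdigit():
--         return False
--
--     check_sum = 0
--     for i, digit in enumerate(serial):
--         weight = 8 - i
--         check_sum += int(digit) * weight
--
--     return check_sum % 11 == 0
-- ===== SOURCE B (Python) =====
-- def magazine_serial_check(serial):
--     digits = serial.replace("-", "")
--     if len(digits) != 8 or not digits.isdigit():
--         return False
--     running = 0
--     total = 0
--     for ch in digits: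
--         running += int(ch)
--         total += running
--     return total % 11 == 0
-- ===== Notes on version B (the rewrite author's own statement) =====
-- stated objective: alternative
-- what changed: Replaces the per-position weight (enumerate, weight = 8-i, check_sum += digit*weight) by a running prefix-sum pair: total of prefix sums equals the same weighted checksum, so no index or weight is ever computed.
import Mathlib
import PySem

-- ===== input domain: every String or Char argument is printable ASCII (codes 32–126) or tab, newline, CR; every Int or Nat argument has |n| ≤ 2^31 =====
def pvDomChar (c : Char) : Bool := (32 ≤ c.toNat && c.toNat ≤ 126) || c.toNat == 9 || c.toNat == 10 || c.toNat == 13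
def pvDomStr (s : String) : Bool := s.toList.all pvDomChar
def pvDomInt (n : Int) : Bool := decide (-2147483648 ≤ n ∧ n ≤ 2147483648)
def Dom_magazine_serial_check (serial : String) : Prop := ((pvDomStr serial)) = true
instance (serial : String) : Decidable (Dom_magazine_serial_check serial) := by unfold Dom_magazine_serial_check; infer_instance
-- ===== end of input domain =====

-- B replaces the per-position weight (enumerate, weight = 8-i) by a running prefix-sum pair; alternative decomposition, same cost.

-- ===== PORT A =====
-- int(digit) on a one-char digit string; .getD 0 is unreachable under the isdigit guard
def magazine_serial_check (serial : String) : Bool :=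
  let s := PySem.Str.replace serial "-" ""
  if PySem.Str.len s ≠ 8 || !PySem.Str.strIsdigit s then false
  else
    let check_sum := (PySem.List.enumerate s.toList 0).foldl
      (fun acc p => acc + ((PySem.Int.ofChars? [p.2]).getD 0) * (8 - p.1)) 0
    decide (PySem.Int.mod check_sum 11 = 0)

-- ===== PORT B =====
def magazine_serial_check_alt (serial : String) : Bool :=
  let digits := PySem.Str.replace serial "-" ""
  if PySem.Str.len digits ≠ 8 || !PySem.Str.strIsdigit digits then false
  else
    let rt := digits.toList.foldl
      (fun (p : Int × Int) ch =>
        (p.1 + (PySem.Int.ofChars? [ch]).getD 0,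
         p.2 + p.1 + (PySem.Int.ofChars? [ch]).getD 0))
      (0, 0)
    decide (PySem.Int.mod rt.2 11 = 0)

-- ===== PRECONDITION & SPEC =====
def Spec_magazine_serial_check (serial : String) (out : Bool) : Prop := out = magazine_serial_check_alt serial
instance (serial : String) (out : Bool) : Decidable (Spec_magazine_serial_check serial out) := by unfold Spec_magazine_serial_check; infer_instance

-- ===== CLAIM (what is proved, stated in full; the proofs are below) =====
def Claim_equal_magazine_serial_check : Prop := ∀ (serial : String), Dom_magazine_serial_check serial → Spec_magazine_serial_check serial (magazine_serial_check serial)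

-- ===== LEMMAS AND PROOFS =====

-- weighted sum with decreasing weight starting at w
def pvWsum (v : Char → Int) : List Char → Int → Int
  | [], _ => 0
  | c :: cs, w => v c * w + pvWsum v cs (w - 1)

def pvSumv (v : Char → Int) (cs : List Char) : Int := (cs.map v).sum

theorem pvFoldA (v : Char → Int) : ∀ (cs : List Char) (s acc : Int),
    (PySem.List.enumerate cs s).foldl (fun a p => a + v p.2 * (8 - p.1)) acc
      = acc + pvWsum v cs (8 - s) := by
  intro cs
  induction cs with
  | nil => intro s acc; simp [PySem.List.enumerate_nil, pvWsum]
  | cons c cs ih =>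
      intro s acc
      rw [PySem.List.enumerate_cons]
      simp only [List.foldl_cons, ih, pvWsum]
      ring

theorem pvFoldB (v : Char → Int) : ∀ (cs : List Char) (r0 t0 : Int),
    cs.foldl (fun (p : Int × Int) ch => (p.1 + v ch, p.2 + p.1 + v ch)) (r0, t0)
      = (r0 + pvSumv v cs, t0 + pvWsum v cs cs.length + r0 * cs.length) := by
  intro cs
  induction cs with
  | nil => intro r0 t0; simp [pvSumv, pvWsum]
  | cons c cs ih =>
      intro r0 t0
      simp only [List.foldl_cons, ih, pvSumv, pvWsum, List.map_cons, List.sum_cons,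
        List.length_cons]
      simp only [Prod.mk.injEq]
      refine ⟨by ring, by push_cast; ring⟩

-- ===== VERDICT (by name: the statement is the Claim_ definition above) =====
theorem magazine_serial_check_spec : Claim_equal_magazine_serial_check := by
  intro serial _
  unfold Spec_magazine_serial_check magazine_serial_check magazine_serial_check_alt
  set s := PySem.Str.replace serial "-" "" with hs
  by_cases hlen : s.toList.length = 8
  · simp only [PySem.Str.len]
    rw [show (PySem.List.enumerate s.toList).foldl
          (fun acc p => acc + ((PySem.Int.ofChars? [p.2]).getD 0) * (8 - p.1)) 0
        = pvWsum (fun c => (PySem.Int.ofChars? [c]).getD 0) s.toList 8 from by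
          simpa using pvFoldA (fun c => (PySem.Int.ofChars? [c]).getD 0) s.toList 0 0,
        pvFoldB (fun c => (PySem.Int.ofChars? [c]).getD 0) s.toList 0 0]
    simp [hlen]
  · have h8 : ¬ ((s.length : Int) = 8) := by
      rw [← String.length_toList]; exact_mod_cast hlen
    simp [PySem.Str.len, h8]
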